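-- pv_equiv track=rewrite | github.com/yinzjtw/Python-projects | a6_尹致潔/boggle.py | row_checker
-- ===== SOURCE A (Python) =====
-- def row_checker(row):
-- 	"""
-- 	:param row: (str) the string user inputted.
-- 	:return:　(bool) Whether the inputted row is legal or not.
-- 	"""
-- 	if len(row) != 7:
-- 		return False
-- 	else:
-- 		for i in range(4):
-- 			if not row[i*2].isalpha():
-- 				return False
-- 		for i in range(3):
-- 			if not row[1+i*2] == ' ':
-- 				return False
-- 	return True
-- ===== SOURCE B (Python) =====
-- def row_checker(row):
-- 	"""
-- 	:param row: (str) the string user inputted.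
-- 	:return:　(bool) Whether the inputted row is legal or not.
-- 	"""
-- 	if len(row) != 7:
-- 		return False
-- 	return all(c.isalpha() for c in row[0::2]) and row[1::2] == '   '
-- ===== Notes on version B (the rewrite author's own statement) =====
-- stated objective: idiomatic
-- what changed: Replaces the two per-index loops with a single all() over the stride-2 letter slice and one whole-string equality of the separator slice against three spaces.
import Mathlib
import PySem

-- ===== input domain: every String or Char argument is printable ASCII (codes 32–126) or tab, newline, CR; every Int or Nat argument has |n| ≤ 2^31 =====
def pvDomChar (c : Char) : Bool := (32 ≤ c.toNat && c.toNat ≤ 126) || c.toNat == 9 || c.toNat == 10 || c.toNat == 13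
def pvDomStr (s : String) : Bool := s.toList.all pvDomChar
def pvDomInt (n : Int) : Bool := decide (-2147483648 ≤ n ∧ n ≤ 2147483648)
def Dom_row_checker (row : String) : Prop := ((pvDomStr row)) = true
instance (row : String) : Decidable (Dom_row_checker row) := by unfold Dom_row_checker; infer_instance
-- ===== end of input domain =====

-- B replaces A's two per-index loops by an all() over the stride-2 letter slice and one
-- whole-string equality of the separator slice against '   ' (idiomatic; same cost).

-- ===== PORT A =====
-- literal port: length guard, then a loop over i<4 checking row[2i].isalpha(), then a loop
-- over i<3 checking row[1+2i] == ' ' (each loop returns False on the first failure, i.e. `all`).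
def row_checker (row : String) : Bool :=
  let cs := row.toList
  if cs.length ≠ 7 then false
  else
    ((List.range 4).all fun i =>
        (PySem.List.pyGet? cs ((i : Int) * 2)).elim false PySem.Chars.isalpha) &&
    ((List.range 3).all fun i =>
        (PySem.List.pyGet? cs (1 + (i : Int) * 2)).elim false (· == ' '))

-- ===== PORT B =====
-- literal port of Source B: length guard, then all-alpha on row[0::2] and row[1::2] == '   '.
def row_checker_alt (row : String) : Bool :=
  let cs := row.toList
  if cs.length ≠ 7 then false
  else
    (match PySem.List.slice? cs (some 0) none 2 with
     | some l => l.all PySem.Chars.isalpha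
     | none => false) &&
    (PySem.List.slice? cs (some 1) none 2 == some "   ".toList)

-- ===== PRECONDITION & SPEC =====
def Spec_row_checker (row : String) (out : Bool) : Prop := out = row_checker_alt row
instance (row : String) (out : Bool) : Decidable (Spec_row_checker row out) := by unfold Spec_row_checker; infer_instance

-- ===== CLAIM (what is proved, stated in full; the proofs are below) =====
def Claim_equal_row_checker : Prop := ∀ (row : String), Dom_row_checker row → Spec_row_checker row (row_checker row)

-- ===== LEMMAS AND PROOFS =====
theorem rc_eq (row : String) : row_checker row = row_checker_alt row := by
  unfold row_checker row_checker_alt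
  rcases h : row.toList with _ | ⟨a, _ | ⟨b, _ | ⟨c, _ | ⟨d, _ | ⟨e, _ | ⟨f, _ | ⟨g, _ | ⟨x, t⟩⟩⟩⟩⟩⟩⟩⟩ <;>
    simp [PySem.List.slice?, PySem.List.sliceIndices, PySem.List.pyGet?, PySem.List.pyIdx?, List.range_succ, Bool.and_assoc]

-- ===== VERDICT (by name: the statement is the Claim_ definition above) =====
theorem row_checker_spec : Claim_equal_row_checker := by
  intro row _
  unfold Spec_row_checker
  exact rc_eq row
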